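-- pv_equiv track=rewrite | github.com/salmon131/TIL | Clone_Coding/my_tenacity/tenacity/_utils.py | find_ordinal
-- ===== SOURCE A (Python) =====
-- def find_ordinal(pos_num: int) -> str:
--     if pos_num == 0:
--         return "th"
--     elif pos_num == 1:
--         return "st"
--     elif pos_num == 2:
--         return "nd"
--     elif pos_num == 3:
--         return "rd"
--     elif 4 <= pos_num <= 20:
--         return "th"
--     else:
--         return find_ordinal(pos_num % 10)
-- ===== SOURCE B (Python) =====
-- def find_ordinal(pos_num: int) -> str:
--     if 4 <= pos_num <= 20:
--         return "th"
--     return {1: "st", 2: "nd", 3: "rd"}.get(pos_num % 10, "th")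
-- ===== Notes on version B (the rewrite author's own statement) =====
-- stated objective: simpler
-- what changed: Replaced A's self-recursion and its chain of small-number equality branches with a single teens-range guard followed by a modulo reduction and one dict lookup.
import Mathlib
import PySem

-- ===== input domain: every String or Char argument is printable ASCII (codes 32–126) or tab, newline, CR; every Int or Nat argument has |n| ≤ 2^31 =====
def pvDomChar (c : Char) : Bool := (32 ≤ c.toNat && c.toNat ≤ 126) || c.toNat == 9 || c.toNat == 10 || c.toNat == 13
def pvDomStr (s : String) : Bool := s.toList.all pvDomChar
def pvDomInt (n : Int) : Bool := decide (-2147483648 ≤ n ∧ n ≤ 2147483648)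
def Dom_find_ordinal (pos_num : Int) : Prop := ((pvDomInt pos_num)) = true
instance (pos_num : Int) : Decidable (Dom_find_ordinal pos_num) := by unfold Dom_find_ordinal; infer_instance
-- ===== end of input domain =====

-- B replaces A's self-recursion and separate 0/1/2/3 branches with one guard plus a modulo-then-dict-lookup (simpler).
-- ===== PORT A =====
def find_ordinal (pos_num : Int) : String :=
  if pos_num = 0 then "th"
  else if pos_num = 1 then "st"
  else if pos_num = 2 then "nd"
  else if pos_num = 3 then "rd"
  else if 4 ≤ pos_num ∧ pos_num ≤ 20 then "th"
  else find_ordinal (PySem.Int.mod pos_num 10)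
termination_by (if 0 ≤ pos_num ∧ pos_num ≤ 20 then 0 else 1 : Nat)
decreasing_by
  have hm : PySem.Int.mod pos_num 10 = pos_num % 10 := PySem.Int.mod_eq_emod_of_pos (by omega)
  have h0 : 0 ≤ pos_num % 10 := Int.emod_nonneg _ (by omega)
  have h1 : pos_num % 10 < 10 := Int.emod_lt_of_pos _ (by omega)
  simp only [hm]
  rw [if_pos (by omega), if_neg (by omega)]
  omega

-- ===== PORT B =====
def find_ordinal_alt (pos_num : Int) : String :=
  if 4 ≤ pos_num ∧ pos_num ≤ 20 then "th"
  else (PySem.Dict.ofList [((1 : Int), "st"), (2, "nd"), (3, "rd")]).getD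
         (PySem.Int.mod pos_num 10) "th"

-- ===== PRECONDITION & SPEC =====
def Spec_find_ordinal (pos_num : Int) (out : String) : Prop := out = find_ordinal_alt pos_num
instance (pos_num : Int) (out : String) : Decidable (Spec_find_ordinal pos_num out) := by unfold Spec_find_ordinal; infer_instance

-- ===== CLAIM (what is proved, stated in full; the proofs are below) =====
def Claim_equal_find_ordinal : Prop := ∀ (pos_num : Int), Dom_find_ordinal pos_num → Spec_find_ordinal pos_num (find_ordinal pos_num)

-- ===== LEMMAS AND PROOFS =====

-- On 0 ≤ m < 10, A's non-recursive branches agree with B's dict lookup.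
theorem base_agree (m : Int) (h0 : 0 ≤ m) (h1 : m < 10) :
    find_ordinal m = (PySem.Dict.ofList [((1 : Int), "st"), (2, "nd"), (3, "rd")]).getD m "th" := by
  interval_cases m <;> (rw [find_ordinal]; decide)

-- Outside 4..20, one unfolding of A reduces it to its value at n % 10 (also when n ∈ {0,1,2,3}).
theorem step (n : Int) (hg : ¬(4 ≤ n ∧ n ≤ 20)) :
    find_ordinal n = find_ordinal (n % 10) := by
  by_cases h0 : n = 0
  · subst h0; norm_num
  by_cases h1 : n = 1
  · subst h1; norm_num
  by_cases h2 : n = 2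
  · subst h2; norm_num
  by_cases h3 : n = 3
  · subst h3; norm_num
  conv_lhs => rw [find_ordinal]
  rw [if_neg h0, if_neg h1, if_neg h2, if_neg h3, if_neg hg,
      PySem.Int.mod_eq_emod_of_pos (by omega : (0:Int) < 10)]

-- ===== VERDICT (by name: the statement is the Claim_ definition above) =====
theorem find_ordinal_spec : Claim_equal_find_ordinal := by
  intro n _
  show find_ordinal n = find_ordinal_alt n
  have hm : PySem.Int.mod n 10 = n % 10 := PySem.Int.mod_eq_emod_of_pos (by omega)
  rw [find_ordinal_alt]
  by_cases hg : 4 ≤ n ∧ n ≤ 20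
  · rw [if_pos hg, find_ordinal,
        if_neg (by omega : ¬ n = 0), if_neg (by omega : ¬ n = 1),
        if_neg (by omega : ¬ n = 2), if_neg (by omega : ¬ n = 3), if_pos hg]
  · rw [if_neg hg, hm, step n hg,
        base_agree (n % 10) (Int.emod_nonneg _ (by omega)) (Int.emod_lt_of_pos _ (by omega))]
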